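-- pv_equiv track=rewrite | github.com/jamqd/MITx | ProblemSetMidFin/hello.py | largest_odd_times
-- ===== SOURCE A (Python) =====
-- def largest_odd_times(L):
--     """ Assumes L is a non-empty list of ints
--         Returns the largest element of L that occurs an odd number
--         of times in L. If no such element exists, returns None """
--     freq = {}
--     for n in range (0, len(L)):
--         if L[n] in freq:
--             freq[L[n]] += 1
--         else:
--             freq[L[n]] = 1
--
--     largestL = None
--
--     for i in freq:
--         if (largestL == None or i > largestL) and freq[i] % 2 == 1:
--             largestL = i
--     return largestL
-- ===== SOURCE B (Python) =====
-- def largest_odd_times(L):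
--     """ Assumes L is a non-empty list of ints
--         Returns the largest element of L that occurs an odd number
--         of times in L. If no such element exists, returns None """
--     odd = set()
--     for x in L:
--         if x in odd:
--             odd.remove(x)
--         else:
--             odd.add(x)
--     return max(odd) if odd else None
-- ===== Notes on version B (the rewrite author's own statement) =====
-- stated objective: simpler
-- what changed: Replaces the count dictionary plus a second max-scan over its keys by a single pass that toggles membership in a parity set (element present iff seen an odd number of times so far) and returns the set's maximum.
import Mathlib
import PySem

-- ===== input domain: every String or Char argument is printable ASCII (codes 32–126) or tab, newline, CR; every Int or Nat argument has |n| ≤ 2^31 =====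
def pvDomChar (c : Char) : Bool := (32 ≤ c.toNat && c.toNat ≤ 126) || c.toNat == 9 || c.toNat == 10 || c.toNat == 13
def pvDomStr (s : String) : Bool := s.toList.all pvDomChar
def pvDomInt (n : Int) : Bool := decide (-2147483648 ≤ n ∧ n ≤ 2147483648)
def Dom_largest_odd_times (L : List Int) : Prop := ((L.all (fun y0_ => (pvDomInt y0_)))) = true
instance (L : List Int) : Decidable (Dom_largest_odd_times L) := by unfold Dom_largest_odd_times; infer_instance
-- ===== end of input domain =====

-- B replaces A's count dictionary + max-scan over its keys by one pass toggling a
-- parity set (element present iff seen an odd number of times) and taking its max.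

-- ===== PORT A =====
def largest_odd_times (L : List Int) : Option Int :=
  -- freq = {}; for n in range(0, len(L)): if L[n] in freq: freq[L[n]] += 1 else: freq[L[n]] = 1
  -- (L[n] is always in range here, so pyGetD is exact)
  let freq : PySem.Dict Int Int :=
    (PySem.List.pyRange 0 (PySem.List.len L)).foldl
      (fun d n =>
        let x := PySem.List.pyGetD L n 0
        if d.contains x then d.modify x 0 (· + 1) else d.insert x 1)
      PySem.Dict.empty
  -- largestL = None; for i in freq: if (largestL == None or i > largestL) and freq[i] % 2 == 1: largestL = i
  -- (every key i is present in freq, so freq.getD i 0 is exactly freq[i])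
  freq.keys.foldl
    (fun largestL i =>
      if (match largestL with
          | none => true
          | some m => decide (i > m))
         && (PySem.Int.mod (freq.getD i 0) 2 == 1)
      then some i else largestL)
    none

-- ===== PORT B =====
def largest_odd_times_alt (L : List Int) : Option Int :=
  -- odd = set(); for x in L: if x in odd: odd.remove(x) else: odd.add(x)
  -- (x is known to be in odd on the remove branch, so discard is exact)
  let odd : PySem.Set Int :=
    L.foldl (fun s x => if PySem.Set.contains s x then PySem.Set.discard s x else PySem.Set.add s x)
      PySem.Set.empty
  -- return max(odd) if odd else None   (max over a set: value is order-independent)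
  if odd = [] then none else PySem.List.max? odd (fun y => y)

-- ===== PRECONDITION & SPEC =====
def Spec_largest_odd_times (L : List Int) (out : Option Int) : Prop := out = largest_odd_times_alt L
instance (L : List Int) (out : Option Int) : Decidable (Spec_largest_odd_times L out) := by unfold Spec_largest_odd_times; infer_instance

-- ===== CLAIM (what is proved, stated in full; the proofs are below) =====
def Claim_equal_largest_odd_times : Prop := ∀ (L : List Int), Dom_largest_odd_times L → Spec_largest_odd_times L (largest_odd_times L)

-- ===== LEMMAS AND PROOFS =====

-- A's dict-building step is exactly Counter's modify step.
lemma step_eq_modify (d : PySem.Dict Int Int) (x : Int) :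
    (if d.contains x then d.modify x 0 (· + 1) else d.insert x 1)
      = d.modify x 0 (· + 1) := by
  by_cases h : d.contains x
  · simp [h]
  · have hg : d.get? x = none :=
      (PySem.Dict.get?_eq_none_iff_contains d x).mpr (by simpa using h)
    simp [h, PySem.Dict.modify, PySem.Dict.getD, hg]

-- A's freq dict is Counter(L).
lemma freq_eq_counter (L : List Int) :
    (PySem.List.pyRange 0 (PySem.List.len L)).foldl
      (fun d n =>
        let x := PySem.List.pyGetD L n 0
        if d.contains x then d.modify x 0 (· + 1) else d.insert x 1)
      PySem.Dict.empty = PySem.Dict.counter L := by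
  have h1 :
      (PySem.List.pyRange 0 (PySem.List.len L)).foldl
        (fun d n =>
          let x := PySem.List.pyGetD L n 0
          if d.contains x then d.modify x 0 (· + 1) else d.insert x 1)
        PySem.Dict.empty
      = L.foldl
          (fun (d : PySem.Dict Int Int) x =>
            if d.contains x then d.modify x 0 (· + 1) else d.insert x 1)
          PySem.Dict.empty :=
    PySem.List.foldl_pyRange_pyGetD L 0
      (fun (d : PySem.Dict Int Int) x =>
        if d.contains x then d.modify x 0 (· + 1) else d.insert x 1)
      PySem.Dict.empty (le_refl 0)
  refine h1.trans ?_
  rw [PySem.Dict.counter_eq_foldl]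
  exact List.foldl_ext _ _ _ (fun d x _ => step_eq_modify d x)

-- the conditional-max step, taken only on elements satisfying a predicate
-- folding A's guarded step = folding the plain max step over the filtered list
lemma foldl_guarded (p : Int → Bool) (l : List Int) (acc : Option Int) :
    l.foldl
      (fun largestL i =>
        if (match largestL with
            | none => true
            | some m => decide (i > m)) && p i
        then some i else largestL) acc
      = (l.filter p).foldl
          (fun largestL i =>
            if (match largestL with
                | none => true
                | some m => decide (i > m))
            then some i else largestL) acc := by
  induction l generalizing acc with
  | nil => rfl
  | cons x t ih =>
    by_cases hp : p x
    · simp only [List.foldl_cons, List.filter_cons_of_pos hp, hp, Bool.and_true]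
      exact ih _
    · simp only [List.foldl_cons, List.filter_cons_of_neg (by simpa using hp), hp,
        Bool.and_false, Bool.false_eq_true, if_false]
      exact ih acc

-- folding the max step from `some m` computes the running max
lemma foldl_maxstep_some (l : List Int) (m : Int) :
    l.foldl
      (fun largestL i =>
        if (match largestL with
            | none => true
            | some m => decide (i > m))
        then some i else largestL) (some m) = some (l.foldl max m) := by
  induction l generalizing m with
  | nil => rfl
  | cons x t ih =>
    by_cases h : x > m
    · simp [h, ih, max_eq_right (le_of_lt h)]
    · simp [h, ih, max_eq_left (not_lt.mp h)]

-- hence the max loop is PySem's max? with identity key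
lemma foldl_maxstep_eq_max? (l : List Int) :
    l.foldl
      (fun largestL i =>
        if (match largestL with
            | none => true
            | some m => decide (i > m))
        then some i else largestL) none = PySem.List.max? l (fun y => y) := by
  cases l with
  | nil => rfl
  | cons x t =>
    rw [PySem.List.max?_id_cons]
    simp [foldl_maxstep_some]

-- max? with identity key is determined by membership alone
lemma max?_congr_mem (l₁ l₂ : List Int) (h : ∀ x, x ∈ l₁ ↔ x ∈ l₂) :
    PySem.List.max? l₁ (fun y => y) = PySem.List.max? l₂ (fun y => y) := by
  cases h₁ : PySem.List.max? l₁ (fun y => y) with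
  | none =>
    rw [PySem.List.max?_eq_none_iff] at h₁
    cases h₂ : PySem.List.max? l₂ (fun y => y) with
    | none => rfl
    | some m₂ =>
      have := PySem.List.max?_mem h₂
      rw [← h] at this
      simp [h₁] at this
  | some m₁ =>
    cases h₂ : PySem.List.max? l₂ (fun y => y) with
    | none =>
      rw [PySem.List.max?_eq_none_iff] at h₂
      have := PySem.List.max?_mem h₁
      rw [h] at this
      simp [h₂] at this
    | some m₂ =>
      have hm₁ := PySem.List.max?_mem h₁
      have hm₂ := PySem.List.max?_mem h₂
      have le₁ : m₁ ≤ m₂ := PySem.List.max?_isMax h₂ m₁ ((h m₁).mp hm₁)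
      have le₂ : m₂ ≤ m₁ := PySem.List.max?_isMax h₁ m₂ ((h m₂).mpr hm₂)
      rw [le_antisymm le₁ le₂]

-- membership in B's parity set ↔ odd count so far (relative to a start set)
lemma toggle_mem (L : List Int) :
    ∀ (s : PySem.Set Int) (x : Int),
      (x ∈ L.foldl
          (fun s x => if PySem.Set.contains s x then PySem.Set.discard s x else PySem.Set.add s x)
          s)
        ↔ (if x ∈ s then L.count x % 2 = 0 else L.count x % 2 = 1) := by
  induction L with
  | nil => intro s x; by_cases h : x ∈ s <;> simp [h]
  | cons y t ih =>
    intro s x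
    by_cases hy : PySem.Set.contains s y
    · have hys : y ∈ s := (PySem.Set.contains_iff s y).mp hy
      simp only [List.foldl_cons, hy, if_true, ih]
      by_cases hxy : x = y
      · subst hxy
        simp [PySem.Set.mem_discard, hys, List.count_cons_self, Nat.add_mod]
        omega
      · have hyx : ¬y = x := fun h => hxy h.symm
        simp [PySem.Set.mem_discard, hxy, hyx]
    · have hys : y ∉ s := fun h => hy ((PySem.Set.contains_iff s y).mpr h)
      simp only [List.foldl_cons, hy, ih]
      by_cases hxy : x = y
      · subst hxy
        simp [hys, List.count_cons_self, Nat.add_mod]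
        omega
      · have hyx : ¬y = x := fun h => hxy h.symm
        simp [hxy, hys, hyx]

-- ===== VERDICT (by name: the statement is the Claim_ definition above) =====
theorem largest_odd_times_spec : Claim_equal_largest_odd_times := by
  intro L _
  show largest_odd_times L = largest_odd_times_alt L
  unfold largest_odd_times largest_odd_times_alt
  rw [freq_eq_counter]
  show _ = (if (L.foldl
      (fun s x => if PySem.Set.contains s x then PySem.Set.discard s x else PySem.Set.add s x)
      PySem.Set.empty) = [] then none
    else PySem.List.max?
      (L.foldl
        (fun s x => if PySem.Set.contains s x then PySem.Set.discard s x else PySem.Set.add s x)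
        PySem.Set.empty) (fun y => y))
  set odd := L.foldl
      (fun s x => if PySem.Set.contains s x then PySem.Set.discard s x else PySem.Set.add s x)
      PySem.Set.empty with hodd
  have hmemB : ∀ x, x ∈ odd ↔ (x ∈ L ∧ L.count x % 2 = 1) := by
    intro x
    rw [hodd, toggle_mem L PySem.Set.empty x]
    have : x ∉ (PySem.Set.empty : PySem.Set Int) := by simp [PySem.Set.empty]
    simp only [this, if_false]
    constructor
    · intro h; exact ⟨List.count_pos_iff.mp (by omega), h⟩
    · exact fun ⟨_, h⟩ => h
  -- rewrite A's second loop into max? over the odd-count keys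
  rw [foldl_guarded (fun i => PySem.Int.mod ((PySem.Dict.counter L).getD i 0) 2 == 1)
        (PySem.Dict.counter L).keys none,
      foldl_maxstep_eq_max?]
  have hmemA : ∀ x,
      x ∈ ((PySem.Dict.counter L).keys.filter
            (fun i => PySem.Int.mod ((PySem.Dict.counter L).getD i 0) 2 == 1))
        ↔ (x ∈ L ∧ L.count x % 2 = 1) := by
    intro x
    rw [List.mem_filter, PySem.Dict.keys_counter, PySem.Set.mem_ofList,
        PySem.Dict.getD_counter]
    constructor
    · intro ⟨hx, hc⟩
      refine ⟨hx, ?_⟩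
      simp only [beq_iff_eq, PySem.Int.mod, Int.fmod_eq_emod] at hc
      omega
    · intro ⟨hx, hc⟩
      refine ⟨hx, ?_⟩
      simp only [beq_iff_eq, PySem.Int.mod, Int.fmod_eq_emod]
      omega
  have hAB := max?_congr_mem _ odd (fun x => (hmemA x).trans (hmemB x).symm)
  rw [hAB]
  by_cases h : odd = []
  · rw [if_pos h, h]; rfl
  · rw [if_neg h]
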